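-- pv_equiv track=rewrite | github.com/sgl-project/sglang | python/sglang/srt/multimodal/processors/molmo2.py | _split_offsets_by_item
-- ===== SOURCE A (Python) =====
-- from typing import List, Optional, Tuple, Union
--
-- def _split_offsets_by_item(
--
--     all_offsets: List[Tuple[int, int]],
--     expected_counts: List[int],
-- ) -> List[List[Tuple[int, int]]]:
--     """Split offsets into groups based on expected token counts per item."""
--     result = []
--     offset_idx = 0
--
--     for count in expected_counts:
--         item_offsets = []
--         tokens_collected = 0
--
--         while tokens_collected < count and offset_idx < len(all_offsets):
--             start, end = all_offsets[offset_idx]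
--             tokens_collected += end - start + 1
--             item_offsets.append((start, end))
--             offset_idx += 1
--
--         result.append(item_offsets)
--
--     return result
-- ===== SOURCE B (Python) =====
-- def _split_offsets_by_item(all_offsets, expected_counts):
--     """Split offsets into groups based on expected token counts per item,
--     via a precomputed prefix-sum table of token lengths and slicing."""
--     n = len(all_offsets)
--     prefix = [0]
--     running = 0
--     for start, end in all_offsets:
--         running += end - start + 1
--         prefix.append(running)
--     result = []
--     prev = 0
--     for count in expected_counts:
--         target = prefix[prev] + count
--         nxt = prev
--         while nxt < n and prefix[nxt] < target:
--             nxt += 1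
--         result.append(all_offsets[prev:nxt])
--         prev = nxt
--     return result
-- ===== Notes on version B (the rewrite author's own statement) =====
-- stated objective: alternative
-- what changed: B precomputes a prefix-sum table of token lengths once and then, for each expected count, locates the next group boundary in the table and emits the group as a single slice of all_offsets, instead of A's per-item re-accumulating inner loop that appends offsets one by one.
import Mathlib
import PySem

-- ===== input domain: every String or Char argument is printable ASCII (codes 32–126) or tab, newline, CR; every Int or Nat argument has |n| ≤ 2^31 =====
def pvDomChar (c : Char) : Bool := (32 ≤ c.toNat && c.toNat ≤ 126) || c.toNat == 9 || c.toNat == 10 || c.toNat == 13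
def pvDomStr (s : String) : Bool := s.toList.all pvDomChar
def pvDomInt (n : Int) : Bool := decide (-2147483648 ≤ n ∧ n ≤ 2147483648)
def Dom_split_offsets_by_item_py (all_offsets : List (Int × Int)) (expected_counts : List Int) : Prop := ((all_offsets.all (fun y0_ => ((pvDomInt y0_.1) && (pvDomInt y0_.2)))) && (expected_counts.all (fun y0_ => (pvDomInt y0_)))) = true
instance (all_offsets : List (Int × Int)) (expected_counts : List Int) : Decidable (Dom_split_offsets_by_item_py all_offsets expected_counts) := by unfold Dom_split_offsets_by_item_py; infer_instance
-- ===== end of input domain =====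

-- B replaces A's per-item re-accumulating inner loop by a prefix-sum table of token
-- lengths: each group becomes one boundary search in the table plus one slice
-- (objective: alternative decomposition, same asymptotic cost).

-- ===== PORT A =====
-- inner 'while tokens_collected < count and offset_idx < len(all_offsets)' loop of A;
-- xs[idx] is always in range here (guarded by the condition), so the checked access is exact
def aInner (xs : List (Int × Int)) (count : Int) (tokens : Int) (idx : Nat)
    (acc : List (Int × Int)) : List (Int × Int) × Nat :=
  if h : tokens < count ∧ idx < xs.length then
    -- start, end = all_offsets[offset_idx], unpacked inline
    aInner xs count (tokens + (xs[idx].2 - xs[idx].1 + 1)) (idx + 1) (acc ++ [xs[idx]])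
  else (acc, idx)
termination_by xs.length - idx
decreasing_by omega

def split_offsets_by_item_py (all_offsets : List (Int × Int)) (expected_counts : List Int) :
    List (List (Int × Int)) :=
  (expected_counts.foldl
    (fun (st : List (List (Int × Int)) × Nat) count =>
      let r := aInner all_offsets count 0 st.2 []
      (st.1 ++ [r.1], r.2))
    ([], 0)).1

-- ===== PORT B =====
-- the 'prefix = [0]; running += end - start + 1; prefix.append(running)' loop of Source B
def bPrefix (running : Int) : List (Int × Int) → List Int
  | [] => [running]
  | (s, e) :: rest => running :: bPrefix (running + (e - s + 1)) rest

-- the 'while nxt < n and prefix[nxt] < target' boundary search of Source B;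
-- prefix[nxt] is always in range (nxt < n < len(prefix)), so getD is exact
def bFind (pre : List Int) (target : Int) (n : Nat) (nxt : Nat) : Nat :=
  if h : nxt < n ∧ pre.getD nxt 0 < target then bFind pre target n (nxt + 1) else nxt
termination_by n - nxt
decreasing_by omega

def split_offsets_by_item_py_alt (all_offsets : List (Int × Int)) (expected_counts : List Int) :
    List (List (Int × Int)) :=
  let n := all_offsets.length
  let pre := bPrefix 0 all_offsets
  (expected_counts.foldl
    (fun (st : List (List (Int × Int)) × Nat) count =>
      let prev := st.2
      let target := pre.getD prev 0 + count   -- prefix[prev], prev ≤ n so in range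
      let nxt := bFind pre target n prev
      (st.1 ++ [PySem.List.slice all_offsets (some (prev : Int)) (some (nxt : Int))], nxt))
    ([], 0)).1

-- ===== PRECONDITION & SPEC =====
def Spec_split_offsets_by_item_py (all_offsets : List (Int × Int)) (expected_counts : List Int) (out : List (List (Int × Int))) : Prop := out = split_offsets_by_item_py_alt all_offsets expected_counts
instance (all_offsets : List (Int × Int)) (expected_counts : List Int) (out : List (List (Int × Int))) : Decidable (Spec_split_offsets_by_item_py all_offsets expected_counts out) := by unfold Spec_split_offsets_by_item_py; infer_instance

-- ===== CLAIM (what is proved, stated in full; the proofs are below) =====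
def Claim_equal_split_offsets_by_item_py : Prop := ∀ (all_offsets : List (Int × Int)) (expected_counts : List Int), Dom_split_offsets_by_item_py all_offsets expected_counts → Spec_split_offsets_by_item_py all_offsets expected_counts (split_offsets_by_item_py all_offsets expected_counts)

-- ===== LEMMAS AND PROOFS =====

/-- total token length of a list of offsets -/
def lenSum (xs : List (Int × Int)) : Int := (xs.map (fun p => p.2 - p.1 + 1)).sum

theorem lenSum_append (xs ys : List (Int × Int)) : lenSum (xs ++ ys) = lenSum xs + lenSum ys := by
  simp [lenSum]

theorem bPrefix_getD (xs : List (Int × Int)) : ∀ (r : Int) (j : Nat), j ≤ xs.length →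
    (bPrefix r xs).getD j 0 = r + lenSum (xs.take j) := by
  induction xs with
  | nil =>
    intro r j h
    have hj : j = 0 := by simpa using h
    subst hj; simp [bPrefix, lenSum]
  | cons p rest ih =>
    intro r j h
    cases j with
    | zero => simp [bPrefix, lenSum]
    | succ k =>
      obtain ⟨s, e⟩ := p
      simp only [bPrefix, List.getD_cons_succ, List.take_succ_cons]
      rw [ih _ k (by simpa using h)]
      have : lenSum ((s, e) :: rest.take k) = (e - s + 1) + lenSum (rest.take k) := by
        simp [lenSum]
      rw [this]; ring

theorem bFind_le (pre : List Int) (target : Int) (n : Nat) :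
    ∀ nxt, nxt ≤ n → bFind pre target n nxt ≤ n := by
  intro nxt h
  induction hk : n - nxt generalizing nxt with
  | zero =>
    have hc : ¬ (nxt < n ∧ pre.getD nxt 0 < target) := by omega
    rw [bFind, dif_neg hc]; exact h
  | succ k ih =>
    rw [bFind]
    split
    · exact ih (nxt + 1) (by omega) (by omega)
    · exact h

/-- The inner loop of A, started at position `prev` having already collected the
segment `xs[prev:j]`, produces exactly the slice up to B's boundary search result. -/
theorem inner_eq (xs : List (Int × Int)) (count : Int) :
    ∀ (j prev : Nat), prev ≤ j → j ≤ xs.length →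
      aInner xs count (lenSum ((xs.drop prev).take (j - prev))) j ((xs.drop prev).take (j - prev)) =
        ((xs.drop prev).take (bFind (bPrefix 0 xs) (lenSum (xs.take prev) + count) xs.length j - prev),
         bFind (bPrefix 0 xs) (lenSum (xs.take prev) + count) xs.length j) := by
  intro j prev hpj hjn
  induction hk : xs.length - j generalizing j with
  | zero =>
    have h1 : ¬ (lenSum ((xs.drop prev).take (j - prev)) < count ∧ j < xs.length) := by omega
    have h2 : ¬ (j < xs.length ∧ (bPrefix 0 xs).getD j 0 < lenSum (xs.take prev) + count) := by omega
    rw [aInner, dif_neg h1, bFind, dif_neg h2]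
  | succ k ih =>
    have hjlt : j < xs.length := by omega
    have hseg : xs.take prev ++ (xs.drop prev).take (j - prev) = xs.take j := by
      rw [← List.take_append_drop prev (xs.take j)]
      congr 1
      · rw [List.take_take]; congr 1; omega
      · rw [List.drop_take]
    have hsum : lenSum (xs.take j) = lenSum (xs.take prev) + lenSum ((xs.drop prev).take (j - prev)) := by
      rw [← hseg, lenSum_append]
    have hpre : (bPrefix 0 xs).getD j 0 = lenSum (xs.take j) := by
      rw [bPrefix_getD xs 0 j hjn]; ring
    by_cases hc : lenSum ((xs.drop prev).take (j - prev)) < count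
    · have h1 : lenSum ((xs.drop prev).take (j - prev)) < count ∧ j < xs.length := ⟨hc, hjlt⟩
      have h2 : j < xs.length ∧ (bPrefix 0 xs).getD j 0 < lenSum (xs.take prev) + count := by
        refine ⟨hjlt, ?_⟩; rw [hpre, hsum]; omega
      rw [aInner, dif_pos h1, bFind, dif_pos h2]
      have hget : (xs.drop prev)[j - prev]? = some xs[j] := by
        rw [List.getElem?_drop]
        have hpj' : prev + (j - prev) = j := by omega
        rw [hpj', List.getElem?_eq_getElem hjlt]
      have hsucc : j - prev + 1 = (j + 1) - prev := by omega
      have hext : (xs.drop prev).take (j - prev) ++ [xs[j]] =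
          (xs.drop prev).take ((j + 1) - prev) := by
        rw [← hsucc, List.take_add_one, hget]; simp
      have hsumext : lenSum ((xs.drop prev).take (j - prev)) + (xs[j].2 - xs[j].1 + 1) =
          lenSum ((xs.drop prev).take ((j + 1) - prev)) := by
        rw [← hext, lenSum_append]; simp [lenSum]
      rw [hext, hsumext]
      exact ih (j + 1) (by omega) (by omega) (by omega)
    · have h1 : ¬ (lenSum ((xs.drop prev).take (j - prev)) < count ∧ j < xs.length) := by
        intro h; exact hc h.1
      have h2 : ¬ (j < xs.length ∧ (bPrefix 0 xs).getD j 0 < lenSum (xs.take prev) + count) := by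
        intro h; apply hc; have h' := h.2; rw [hpre, hsum] at h'; omega
      rw [aInner, dif_neg h1, bFind, dif_neg h2]

/-- One step of A's outer fold equals one step of B's outer fold. -/
theorem step_eq (xs : List (Int × Int)) (count : Int) (acc : List (List (Int × Int))) (prev : Nat)
    (hp : prev ≤ xs.length) :
    (acc ++ [(aInner xs count 0 prev []).1], (aInner xs count 0 prev []).2) =
      (acc ++ [PySem.List.slice xs (some (prev : Int))
          (some ((bFind (bPrefix 0 xs) ((bPrefix 0 xs).getD prev 0 + count) xs.length prev : Nat) : Int))],
       bFind (bPrefix 0 xs) ((bPrefix 0 xs).getD prev 0 + count) xs.length prev) := by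
  have h0 : (xs.drop prev).take (prev - prev) = ([] : List (Int × Int)) := by simp
  have h0s : lenSum ((xs.drop prev).take (prev - prev)) = 0 := by rw [h0]; rfl
  have hin := inner_eq xs count prev prev (le_refl prev) hp
  rw [h0s, h0] at hin
  have htgt : (bPrefix 0 xs).getD prev 0 + count = lenSum (xs.take prev) + count := by
    rw [bPrefix_getD xs 0 prev hp]; ring
  rw [htgt, hin, PySem.List.slice_natCast]

theorem outer_eq (xs : List (Int × Int)) :
    ∀ (counts : List Int) (acc : List (List (Int × Int))) (prev : Nat), prev ≤ xs.length →
      (counts.foldl (fun (st : List (List (Int × Int)) × Nat) count =>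
          let r := aInner xs count 0 st.2 []
          (st.1 ++ [r.1], r.2)) (acc, prev)) =
      (counts.foldl (fun (st : List (List (Int × Int)) × Nat) count =>
          let prev' := st.2
          let target := (bPrefix 0 xs).getD prev' 0 + count
          let nxt := bFind (bPrefix 0 xs) target xs.length prev'
          (st.1 ++ [PySem.List.slice xs (some (prev' : Int)) (some (nxt : Int))], nxt)) (acc, prev)) := by
  intro counts
  induction counts with
  | nil => intro acc prev _; rfl
  | cons c cs ih =>
    intro acc prev hp
    simp only [List.foldl_cons]
    rw [step_eq xs c acc prev hp]
    exact ih _ _ (bFind_le _ _ _ prev hp)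

-- ===== VERDICT (by name: the statement is the Claim_ definition above) =====
theorem split_offsets_by_item_py_spec : Claim_equal_split_offsets_by_item_py := by
  intro all_offsets expected_counts _
  unfold Spec_split_offsets_by_item_py split_offsets_by_item_py split_offsets_by_item_py_alt
  rw [outer_eq all_offsets expected_counts [] 0 (Nat.zero_le _)]
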